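-- pv_equiv track=rewrite | github.com/dominicmason555/megalog | parser/main.py | get_to_char
-- ===== SOURCE A (Python) =====
-- from typing import Callable, Optional
--
-- def get_to_char(
--     line: str, end: str, banned: str
-- ) -> tuple[int, Optional[str], Optional[str]]:
--     pos = 0
--     value = ""
--     while pos < len(line):
--         if line[pos] in banned:
--             pos += 1
--             return pos, None, None
--         elif line[pos] in end:
--             pos += 1
--             if value != "":
--                 return pos, value, line[pos - 1]
--             return pos, None, None
--         else:
--             if (value != "") or (not line[pos].isspace()):
--                 value += line[pos]
--             pos += 1
--     return pos, None, None
-- ===== SOURCE B (Python) =====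
-- from typing import Optional
--
--
-- def get_to_char(
--     line: str, end: str, banned: str
-- ) -> tuple[int, Optional[str], Optional[str]]:
--     i = next((k for k in range(len(line))
--               if line[k] in banned or line[k] in end), None)
--     if i is None:
--         return len(line), None, None
--     ch = line[i]
--     if ch in banned:
--         return i + 1, None, None
--     value = line[:i].lstrip()
--     if value:
--         return i + 1, value, ch
--     return i + 1, None, None
-- ===== Notes on version B (the rewrite author's own statement) =====
-- stated objective: simpler
-- what changed: Replaces A's char-by-char accumulate-and-skip state machine with a staged decomposition: first locate the index of the first banned/end character, then answer by case analysis with a slice-and-lstrip of the prefix.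
import Mathlib
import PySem

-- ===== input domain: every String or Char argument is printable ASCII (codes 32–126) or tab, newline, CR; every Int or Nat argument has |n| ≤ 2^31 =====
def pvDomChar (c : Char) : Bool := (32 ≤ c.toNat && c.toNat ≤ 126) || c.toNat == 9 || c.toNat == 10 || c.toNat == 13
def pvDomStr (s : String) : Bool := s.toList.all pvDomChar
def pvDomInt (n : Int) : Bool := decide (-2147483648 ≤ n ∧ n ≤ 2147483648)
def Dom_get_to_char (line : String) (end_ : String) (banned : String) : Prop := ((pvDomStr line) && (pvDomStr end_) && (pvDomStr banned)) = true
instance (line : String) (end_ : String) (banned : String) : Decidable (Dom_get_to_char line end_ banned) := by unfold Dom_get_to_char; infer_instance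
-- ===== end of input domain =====

-- B replaces A's accumulate-and-skip state machine by a staged decomposition:
-- find the index of the first banned/end character, then slice-and-lstrip the prefix
-- (objective: simpler).


-- ===== PORT A =====
-- 'line[pos] in banned' for a single character is exactly character membership:
-- ported as List.contains (exact on one-character needles).
-- The while loop over pos becomes structural recursion on the unread suffix,
-- carrying pos and the accumulated value (as List Char; String.mk at the returns).
def goA (end_ banned : List Char) : List Char → Nat → List Char → Int × Option String × Option String
  | [], pos, _ => ((pos : Int), none, none)
  | c :: rest, pos, value =>
    if banned.contains c then
      ((pos + 1 : Nat), none, none)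
    else if end_.contains c then
      if value ≠ [] then ((pos + 1 : Nat), some (String.mk value), some (String.mk [c]))
      else ((pos + 1 : Nat), none, none)
    else
      goA end_ banned rest (pos + 1)
        (if value ≠ [] || !PySem.Chars.isspace c then value ++ [c] else value)

def get_to_char (line : String) (end_ : String) (banned : String) : Int × Option String × Option String :=
  goA end_.toList banned.toList line.toList 0 []

-- ===== PORT B =====
-- Source B: next(...) over range(len(line)) is List.findIdx? of the first banned-or-end
-- character; line[:i] with 0 ≤ i ≤ len(line) is List.take i; .lstrip() is
-- PySem.Chars.lstrip (exact). No recursion of B's own.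
def altCore (l e b : List Char) : Int × Option String × Option String :=
  match l.findIdx? (fun c => b.contains c || e.contains c) with
  | none => ((l.length : Int), none, none)
  | some i =>
    if b.contains (l.getD i ' ') then
      ((i + 1 : Nat), none, none)
    else if PySem.Chars.lstrip (l.take i) ≠ [] then
      ((i + 1 : Nat), some (String.mk (PySem.Chars.lstrip (l.take i))),
        some (String.mk [l.getD i ' ']))
    else ((i + 1 : Nat), none, none)

def get_to_char_alt (line : String) (end_ : String) (banned : String) : Int × Option String × Option String :=
  altCore line.toList end_.toList banned.toList

-- ===== PRECONDITION & SPEC =====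
def Spec_get_to_char (line : String) (end_ : String) (banned : String) (out : Int × Option String × Option String) : Prop := out = get_to_char_alt line end_ banned
instance (line : String) (end_ : String) (banned : String) (out : Int × Option String × Option String) : Decidable (Spec_get_to_char line end_ banned out) := by unfold Spec_get_to_char; infer_instance

-- ===== CLAIM (what is proved, stated in full; the proofs are below) =====
def Claim_equal_get_to_char : Prop := ∀ (line : String) (end_ : String) (banned : String), Dom_get_to_char line end_ banned → Spec_get_to_char line end_ banned (get_to_char line end_ banned)

-- ===== LEMMAS AND PROOFS =====

-- A's accumulator update is exactly how lstrip grows along the prefix.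
theorem lstrip_append_singleton (p : List Char) (c : Char) :
    PySem.Chars.lstrip (p ++ [c]) =
      (if PySem.Chars.lstrip p ≠ [] || !PySem.Chars.isspace c
        then PySem.Chars.lstrip p ++ [c] else PySem.Chars.lstrip p) := by
  simp only [PySem.Chars.lstrip, List.dropWhile_append]
  by_cases h : List.dropWhile PySem.Chars.isspace p = []
  · by_cases hc : PySem.Chars.isspace c = true <;>
      simp [h, List.dropWhile, hc]
  · simp [h, List.isEmpty_iff]

-- Main invariant: A at suffix `rest`, having consumed a stop-free prefix p with
-- value = lstrip p, equals B's staged computation on the whole line p ++ rest.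
theorem goA_eq_altCore (e b : List Char) (rest p : List Char)
    (hp : ∀ x ∈ p, x ∉ b ∧ x ∉ e) :
    goA e b rest p.length (PySem.Chars.lstrip p) = altCore (p ++ rest) e b := by
  have hpnone : p.findIdx? (fun c => b.contains c || e.contains c) = none := by
    rw [List.findIdx?_eq_none_iff]
    intro x hx
    have := hp x hx
    simp [this.1, this.2]
  induction rest generalizing p with
  | nil =>
    unfold goA altCore
    rw [List.append_nil, hpnone]
  | cons c rest ih =>
    have hget : (p ++ c :: rest).getD p.length ' ' = c := by
      simp [List.getD]
    have htake : (p ++ c :: rest).take p.length = p := by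
      simp
    by_cases hb : c ∈ b
    · have hfind : (p ++ c :: rest).findIdx? (fun c => b.contains c || e.contains c)
          = some p.length := by
        rw [List.findIdx?_append, hpnone, List.findIdx?_cons]
        simp [hb]
      unfold goA altCore
      rw [hfind]
      simp [hget, hb]
    · by_cases he : c ∈ e
      · have hfind : (p ++ c :: rest).findIdx? (fun c => b.contains c || e.contains c)
            = some p.length := by
          rw [List.findIdx?_append, hpnone, List.findIdx?_cons]
          simp [he]
        unfold goA altCore
        rw [hfind]
        simp [hget, htake, hb, he]
      · have hp' : ∀ x ∈ p ++ [c], x ∉ b ∧ x ∉ e := by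
          intro x hx
          rcases List.mem_append.mp hx with h | h
          · exact hp x h
          · simp only [List.mem_singleton] at h; subst h; exact ⟨hb, he⟩
        have hpnone' : (p ++ [c]).findIdx? (fun c => b.contains c || e.contains c) = none := by
          rw [List.findIdx?_eq_none_iff]
          intro x hx
          have := hp' x hx
          simp [this.1, this.2]
        have := ih (p ++ [c]) hp' hpnone'
        simp only [goA, List.contains_eq_mem, decide_eq_true_eq, hb, he, if_false]
        rw [← lstrip_append_singleton]
        simpa using this

-- ===== VERDICT (by name: the statement is the Claim_ definition above) =====
theorem get_to_char_spec : Claim_equal_get_to_char := by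
  intro line end_ banned _
  unfold Spec_get_to_char get_to_char get_to_char_alt
  simpa [PySem.Chars.lstrip] using
    goA_eq_altCore end_.toList banned.toList line.toList [] (by simp)
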